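-- pv_equiv track=rewrite | github.com/OpenVQE/OpenVQE | python/QUCC_active_space/qubit_pool.py | double_position_generator
-- ===== SOURCE A (Python) =====
-- import itertools
--
-- def double_position_generator(nos_qubits):
--     store = []
--     x = [i for i in range(nos_qubits)]
--     ls = list(itertools.permutations(x, 4))
--     for p in range(len(ls)):
--         i, j, k, l = ls[p]
--         if i < j < k < l:
--             store.append(ls[p])
--     return store
-- ===== SOURCE B (Python) =====
-- import itertools
--
-- def double_position_generator(nos_qubits):
--     store = list(itertools.combinations(range(nos_qubits), 4))
--     return store
-- ===== Notes on version B (the rewrite author's own statement) =====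
-- stated objective: faster
-- what changed: Replaces generating all n(n-1)(n-2)(n-3) length-4 permutations and filtering the strictly increasing ones with itertools.combinations, which constructs each increasing quadruple exactly once in the same lexicographic order.
import Mathlib
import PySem

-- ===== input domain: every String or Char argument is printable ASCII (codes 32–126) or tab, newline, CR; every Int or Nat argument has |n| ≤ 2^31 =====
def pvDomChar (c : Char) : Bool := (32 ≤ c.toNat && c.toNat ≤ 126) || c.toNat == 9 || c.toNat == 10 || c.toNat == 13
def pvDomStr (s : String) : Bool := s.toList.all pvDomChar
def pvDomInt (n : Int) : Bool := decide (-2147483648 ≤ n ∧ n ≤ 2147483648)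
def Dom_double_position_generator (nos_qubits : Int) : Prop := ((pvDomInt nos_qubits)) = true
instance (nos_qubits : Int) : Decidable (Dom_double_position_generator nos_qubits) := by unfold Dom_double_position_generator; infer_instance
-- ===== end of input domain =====

-- B replaces A's generate-all-permutations-then-filter by itertools.combinations, which
-- builds each strictly increasing quadruple directly (same values, same lexicographic order).

-- ===== PORT A =====
-- itertools.permutations(x, r): choose the next element at each position (keeping the
-- remaining elements in their original order), which yields tuples in exactly
-- itertools' lexicographic-by-index order.
def pvSel : List Int → List (Int × List Int)
  | [] => []
  | a :: t => (a, t) :: (pvSel t).map (fun p => (p.1, a :: p.2))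

def pvPerms : Nat → List Int → List (List Int)
  | 0, _ => [[]]
  | r + 1, xs => (pvSel xs).flatMap (fun p => (pvPerms r p.2).map (fun q => p.1 :: q))

def double_position_generator (nos_qubits : Int) : List (List Int) :=
  let x := PySem.List.pyRange 0 nos_qubits 1
  let ls := pvPerms 4 x
  (PySem.List.pyRange 0 (ls.length : Int) 1).foldl
    (fun store p =>
      match PySem.List.pyGetD ls p [] with
      | [i, j, k, l] => if i < j ∧ j < k ∧ k < l then store ++ [[i, j, k, l]] else store
      | _ => store)   -- the unpacking 'i, j, k, l = ls[p]' always succeeds: tuples have length 4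
    []

-- ===== PORT B =====
-- itertools.combinations(xs, r): at each step pick the next element from a strictly
-- later suffix, yielding the r-subsequences in itertools' lexicographic order.
def pvSuf : List Int → List (Int × List Int)
  | [] => []
  | a :: t => (a, t) :: pvSuf t

def pvComb : Nat → List Int → List (List Int)
  | 0, _ => [[]]
  | r + 1, xs => (pvSuf xs).flatMap (fun p => (pvComb r p.2).map (fun q => p.1 :: q))

def double_position_generator_alt (nos_qubits : Int) : List (List Int) :=
  pvComb 4 (PySem.List.pyRange 0 nos_qubits 1)

-- ===== PRECONDITION & SPEC =====
def Spec_double_position_generator (nos_qubits : Int) (out : List (List Int)) : Prop := out = double_position_generator_alt nos_qubits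
instance (nos_qubits : Int) (out : List (List Int)) : Decidable (Spec_double_position_generator nos_qubits out) := by unfold Spec_double_position_generator; infer_instance

-- ===== CLAIM (what is proved, stated in full; the proofs are below) =====
def Claim_equal_double_position_generator : Prop := ∀ (nos_qubits : Int), Dom_double_position_generator nos_qubits → Spec_double_position_generator nos_qubits (double_position_generator nos_qubits)

-- ===== LEMMAS AND PROOFS =====

-- strictly increasing chain test (the Boolean content of 'i < j < k < l')
def pvInc : List Int → Bool
  | [] => true
  | [_] => true
  | a :: b :: t => (decide (a < b)) && pvInc (b :: t)

theorem pvFilter_flatMap {α β : Type} (l : List α) (f : α → List β) (q : β → Bool) :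
    (l.flatMap f).filter q = l.flatMap (fun x => (f x).filter q) := by
  induction l with
  | nil => rfl
  | cons a t ih => simp [List.flatMap_cons, List.filter_append, ih]

theorem pvFlatMap_congr {α β : Type} {l : List α} {f g : α → List β}
    (h : ∀ x ∈ l, f x = g x) : l.flatMap f = l.flatMap g := by
  induction l with
  | nil => rfl
  | cons a t ih =>
    simp only [List.flatMap_cons]
    rw [h a (by simp), ih (fun x hx => h x (by simp [hx]))]

theorem pvMem_sel : ∀ (xs : List Int) (pr : Int × List Int), pr ∈ pvSel xs →
    pr.1 ∈ xs ∧ ∀ z ∈ pr.2, z ∈ xs := by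
  intro xs
  induction xs with
  | nil => intro pr h; simp [pvSel] at h
  | cons a t ih =>
    intro pr h
    simp only [pvSel, List.mem_cons, List.mem_map] at h
    rcases h with rfl | ⟨p, hp, rfl⟩
    · exact ⟨by simp, fun z hz => by simp [hz]⟩
    · rcases ih p hp with ⟨h1, h2⟩
      refine ⟨by simp [h1], fun z hz => ?_⟩
      simp only [List.mem_cons] at hz ⊢
      rcases hz with rfl | hz
      · left; rfl
      · right; exact h2 z hz

theorem pvMem_perms : ∀ (r : Nat) (xs : List Int) (q : List Int), q ∈ pvPerms r xs →
    ∀ y ∈ q, y ∈ xs := by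
  intro r
  induction r with
  | zero => intro xs q hq y hy; simp [pvPerms] at hq; subst hq; simp at hy
  | succ r ih =>
    intro xs q hq y hy
    simp only [pvPerms, List.mem_flatMap, List.mem_map] at hq
    rcases hq with ⟨p, hp, q', hq', rfl⟩
    rcases pvMem_sel xs p hp with ⟨h1, h2⟩
    simp only [List.mem_cons] at hy
    rcases hy with rfl | hy
    · exact h1
    · exact h2 y (ih p.2 q' hq' y hy)

theorem pvLen_perms : ∀ (r : Nat) (xs : List Int) (q : List Int), q ∈ pvPerms r xs →
    q.length = r := by
  intro r
  induction r with
  | zero => intro xs q hq; simp [pvPerms] at hq; simp [hq]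
  | succ r ih =>
    intro xs q hq
    simp only [pvPerms, List.mem_flatMap, List.mem_map] at hq
    rcases hq with ⟨p, _, q', hq', rfl⟩
    simp [ih p.2 q' hq']

theorem pvInc_head_lt : ∀ (p : List Int) (b : Int), pvInc (b :: p) = true →
    ∀ y ∈ p, b < y := by
  intro p
  induction p with
  | nil => intro b _ y hy; simp at hy
  | cons c p' ih =>
    intro b h y hy
    simp only [pvInc, Bool.and_eq_true, decide_eq_true_eq] at h
    simp only [List.mem_cons] at hy
    rcases hy with rfl | hy
    · exact h.1
    · exact lt_trans h.1 (ih c h.2 y hy)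

-- any predicate false on lists containing a filters pvPerms of (a :: rest) like pvPerms of rest
theorem pvPerms_filter_drop (a : Int) : ∀ (r : Nat) (rest : List Int) (q : List Int → Bool),
    (∀ p, a ∈ p → q p = false) →
    (pvPerms r (a :: rest)).filter q = (pvPerms r rest).filter q := by
  intro r
  induction r with
  | zero => intro rest q _; rfl
  | succ r ih =>
    intro rest q hq
    simp only [pvPerms, pvSel, List.flatMap_cons, List.flatMap_map, List.filter_append,
      pvFilter_flatMap, List.filter_map]
    have h1 : (pvPerms r rest).filter (q ∘ (a :: ·)) = [] := by
      apply List.filter_eq_nil_iff.mpr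
      intro p _
      simp [hq (a :: p) (by simp)]
    rw [h1]
    simp only [List.map_nil, List.nil_append]
    apply pvFlatMap_congr
    intro p _
    exact congrArg (List.map _) (ih p.2 (q ∘ (p.1 :: ·)) (fun x hx => hq (p.1 :: x) (by simp [hx])))

theorem pvFilter_perms_eq_comb : ∀ (xs : List Int), xs.Pairwise (· < ·) →
    ∀ (r : Nat), (pvPerms r xs).filter pvInc = pvComb r xs := by
  intro xs
  induction xs with
  | nil =>
    intro _ r
    cases r with
    | zero => simp [pvPerms, pvComb, pvInc]
    | succ r => simp [pvPerms, pvComb, pvSel, pvSuf]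
  | cons a t ih =>
    intro hs r
    have hst : t.Pairwise (· < ·) := hs.tail
    have hlt : ∀ y ∈ t, a < y := fun y hy => (List.pairwise_cons.mp hs).1 y hy
    cases r with
    | zero => simp [pvPerms, pvComb, pvInc]
    | succ r =>
      simp only [pvPerms, pvSel, List.flatMap_cons, List.flatMap_map, List.filter_append,
        pvFilter_flatMap, List.filter_map]
      have part1 : (pvPerms r t).filter (pvInc ∘ (a :: ·)) = pvComb r t := by
        rw [List.filter_congr, ih hst r]
        intro p hp
        cases p with
        | nil => simp [pvInc]
        | cons b p' =>
          have hb : b ∈ t := pvMem_perms r t (b :: p') hp b (by simp)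
          simp [pvInc, hlt b hb]
      have part2 : ((pvSel t).flatMap fun p =>
          (((pvPerms r (a :: p.2)).filter (pvInc ∘ (p.1 :: ·))).map (p.1 :: ·))) =
          pvComb (r + 1) t := by
        rw [← ih hst (r + 1)]
        simp only [pvPerms, pvFilter_flatMap, List.filter_map]
        apply pvFlatMap_congr
        intro p hp
        have hp1 : p.1 ∈ t := (pvMem_sel t p hp).1
        have hkill : ∀ q, a ∈ q → (pvInc ∘ (p.1 :: ·)) q = false := by
          intro q haq
          cases htest : pvInc (p.1 :: q) with
          | false => simp [Function.comp, htest]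
          | true =>
            exfalso
            have h1 := pvInc_head_lt q p.1 htest a haq
            have h2 := hlt p.1 hp1
            omega
        rw [pvPerms_filter_drop a r p.2 _ hkill]
      rw [part1, part2]
      simp [pvComb, pvSuf, List.flatMap_cons]

-- A's loop is a filter of the permutation list
theorem pvFoldl_filter : ∀ (ls : List (List Int)) (acc : List (List Int)),
    (∀ t ∈ ls, t.length = 4) →
    ls.foldl (fun store t =>
      match t with
      | [i, j, k, l] => if i < j ∧ j < k ∧ k < l then store ++ [[i, j, k, l]] else store
      | _ => store) acc = acc ++ ls.filter pvInc := by
  intro ls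
  induction ls with
  | nil => intro acc _; simp
  | cons t rest ih =>
    intro acc hlen
    have ht : t.length = 4 := hlen t (by simp)
    rcases t with _ | ⟨i, _ | ⟨j, _ | ⟨k, _ | ⟨l, _ | ⟨m, t'⟩⟩⟩⟩⟩ <;> simp at ht
    have hrest : ∀ u ∈ rest, u.length = 4 := fun u hu => hlen u (by simp [hu])
    simp only [List.foldl_cons]
    by_cases h : i < j ∧ j < k ∧ k < l
    · rw [if_pos h, ih _ hrest]
      have : pvInc [i, j, k, l] = true := by
        simp [pvInc]; omega
      simp [this]
    · rw [if_neg h, ih _ hrest]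
      have : pvInc [i, j, k, l] = false := by
        simp [pvInc]; omega
      simp [this]

theorem pvA_eq (n : Int) : double_position_generator n =
    (pvPerms 4 (PySem.List.pyRange 0 n 1)).filter pvInc := by
  unfold double_position_generator
  rw [PySem.List.foldl_pyRange_zero_pyGetD' (pvPerms 4 (PySem.List.pyRange 0 n 1)) []
    (fun store t =>
      match t with
      | [i, j, k, l] => if i < j ∧ j < k ∧ k < l then store ++ [[i, j, k, l]] else store
      | _ => store) []]
  rw [pvFoldl_filter _ [] (fun t ht => pvLen_perms 4 _ t ht)]
  simp

-- ===== VERDICT (by name: the statement is the Claim_ definition above) =====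
theorem double_position_generator_spec : Claim_equal_double_position_generator := by
  intro n _
  unfold Spec_double_position_generator
  rw [pvA_eq]
  exact pvFilter_perms_eq_comb _ (PySem.List.pairwise_lt_pyRange_one 0 n) 4
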